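-- pv_equiv track=rewrite | github.com/JohnSunny21/python-daily-coding | FreeCodeCamp/CodingQ/BattleOfWords.py | battle_of_words
-- ===== SOURCE A (Python) =====
-- def word_value(word):
--     value = 0
--     for ch in word:
--         if ch.isupper():
--             value += (ord(ch) - ord('A') + 1) * 2
--         else:
--             value += ord(ch) - ord('a') + 1
--
--     return value
--
-- def battle_of_words(our_team, their_team):
--     our_words = our_team.split(' ')
--     their_words = their_team.split(' ')
--
--
--     our_score = 0
--     their_score = 0
--
--     for our_word, their_word in zip(our_words, their_words):
--         our_val = word_value(our_word)
--         their_val = word_value(their_word)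
--         if our_val > their_val:
--             our_score += 1
--         elif their_val > our_val:
--             their_score += 1
--
--         # If equal , no one success
--
--     if our_score > their_score:
--         return "We win"
--     elif their_score > our_score:
--         return "We lose"
--     else:
--         return "Draw"
-- ===== SOURCE B (Python) =====
-- def battle_of_words(our_team, their_team):
--     n1, n2 = len(our_team), len(their_team)
--     i = j = 0
--     net = 0
--     while True:
--         a = 0
--         while i < n1 and our_team[i] != ' ':
--             c = our_team[i]
--             a += (ord(c) - 64) * 2 if 'A' <= c <= 'Z' else ord(c) - 96
--             i += 1
--         b = 0
--         while j < n2 and their_team[j] != ' ':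
--             c = their_team[j]
--             b += (ord(c) - 64) * 2 if 'A' <= c <= 'Z' else ord(c) - 96
--             j += 1
--         if a > b:
--             net += 1
--         elif b > a:
--             net -= 1
--         if i < n1 and j < n2:
--             i += 1
--             j += 1
--         else:
--             break
--     return "We win" if net > 0 else "We lose" if net < 0 else "Draw"
-- ===== Notes on version B (the rewrite author's own statement) =====
-- stated objective: alternative
-- what changed: B never splits the strings into word lists: it runs a two-pointer character-level scan over both raw strings, reading each word's score directly off the characters up to the next space and folding the comparison of each pair into one signed net counter, whereas A builds both split lists, zips them and tallies two win counters.
import Mathlib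
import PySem

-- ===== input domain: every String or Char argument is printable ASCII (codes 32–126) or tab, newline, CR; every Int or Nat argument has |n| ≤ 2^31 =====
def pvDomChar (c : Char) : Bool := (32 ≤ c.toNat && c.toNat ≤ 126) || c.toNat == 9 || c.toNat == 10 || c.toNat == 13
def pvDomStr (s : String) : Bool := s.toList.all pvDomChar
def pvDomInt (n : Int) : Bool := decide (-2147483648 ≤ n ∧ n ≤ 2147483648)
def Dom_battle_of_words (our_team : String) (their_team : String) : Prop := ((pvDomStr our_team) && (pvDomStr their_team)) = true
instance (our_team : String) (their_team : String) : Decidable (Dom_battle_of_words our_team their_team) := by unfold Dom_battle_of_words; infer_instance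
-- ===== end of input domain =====

-- B replaces A's split-then-zip-then-tally algorithm by a single two-pointer character scan that
-- reads word scores directly off both strings (no word lists) into one signed net counter
-- (objective: alternative).

-- ===== PORT A =====
-- word_value: loop over the word's characters with an accumulator
def word_value (word : List Char) : Int :=
  word.foldl (fun value ch =>
    if PySem.Chars.isupper ch then value + ((ch.toNat : Int) - 65 + 1) * 2
    else value + ((ch.toNat : Int) - 97 + 1)) 0

def battle_of_words (our_team : String) (their_team : String) : String :=
  let our_words := PySem.Chars.splitOn our_team.toList [' ']
  let their_words := PySem.Chars.splitOn their_team.toList [' ']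
  let scores := (our_words.zip their_words).foldl (fun (st : Int × Int) wp =>
    let our_val := word_value wp.1
    let their_val := word_value wp.2
    if our_val > their_val then (st.1 + 1, st.2)
    else if their_val > our_val then (st.1, st.2 + 1)
    else st) (0, 0)
  if scores.1 > scores.2 then "We win"
  else if scores.2 > scores.1 then "We lose"
  else "Draw"

-- ===== PORT B =====
-- B's per-character score ('A' <= c <= 'Z' test, exactly as Source B writes it)
def bchar (c : Char) : Int :=
  if 'A' ≤ c ∧ c ≤ 'Z' then ((c.toNat : Int) - 64) * 2 else (c.toNat : Int) - 96

-- B's inner while loop: advance the pointer until a space or the end of the string,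
-- accumulating the current word's score; returns the score and the rest after the
-- space (none = pointer hit the end of the string)
def readWordB : List Char → Int → Int × Option (List Char)
  | [], a => (a, none)
  | c :: rest, a => if c = ' ' then (a, some rest) else readWordB rest (a + bchar c)

theorem readWordB_some_lt : ∀ (s : List Char) (a v : Int) (r : List Char),
    readWordB s a = (v, some r) → r.length < s.length := by
  intro s
  induction s with
  | nil => intro a v r h; simp [readWordB] at h
  | cons c rest ih =>
    intro a v r h
    simp only [readWordB] at h
    split_ifs at h with hc
    · rw [Prod.mk.injEq, Option.some.injEq] at h
      rw [← h.2]
      simp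
    · have := ih _ _ _ h
      simp only [List.length_cons]
      omega

-- B's outer while loop: read one word score from each string, update the net counter,
-- continue only while both pointers stopped at a space (i < n1 and j < n2)
def loopB (s t : List Char) (net : Int) : Int :=
  match h1 : readWordB s 0, readWordB t 0 with
  | (a, some s'), (b, some t') =>
      loopB s' t' (if a > b then net + 1 else if b > a then net - 1 else net)
  | (a, _), (b, _) => if a > b then net + 1 else if b > a then net - 1 else net
termination_by s.length
decreasing_by exact readWordB_some_lt s 0 _ _ h1

def battle_of_words_alt (our_team : String) (their_team : String) : String :=
  let net := loopB our_team.toList their_team.toList 0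
  if net > 0 then "We win" else if net < 0 then "We lose" else "Draw"

-- ===== PRECONDITION & SPEC =====
def Spec_battle_of_words (our_team : String) (their_team : String) (out : String) : Prop := out = battle_of_words_alt our_team their_team
instance (our_team : String) (their_team : String) (out : String) : Decidable (Spec_battle_of_words our_team their_team out) := by unfold Spec_battle_of_words; infer_instance

-- ===== CLAIM (what is proved, stated in full; the proofs are below) =====
def Claim_equal_battle_of_words : Prop := ∀ (our_team : String) (their_team : String), Dom_battle_of_words our_team their_team → Spec_battle_of_words our_team their_team (battle_of_words our_team their_team)

-- ===== LEMMAS AND PROOFS =====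

-- reference splitter: splitOn on a single space, as a plain structural recursion
def mySplit : List Char → List (List Char)
  | [] => [[]]
  | c :: r => if c = ' ' then [] :: mySplit r
    else match mySplit r with
      | w :: ws => (c :: w) :: ws
      | [] => [[c]]

theorem mySplit_ne_nil (s : List Char) : mySplit s ≠ [] := by
  cases s with
  | nil => simp [mySplit]
  | cons c r =>
    simp only [mySplit]
    split_ifs
    · simp
    · split <;> simp

def glue (p : List Char) : List (List Char) → List (List Char)
  | w :: ws => (p ++ w) :: ws
  | [] => [p]

theorem go_inv (fuel : Nat) (l cur : List Char) (acc : List (List Char)) (h : l.length < fuel) :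
    PySem.Chars.splitOn.go [' '] fuel l cur acc = acc.reverse ++ glue cur.reverse (mySplit l) := by
  induction fuel generalizing l cur acc with
  | zero => omega
  | succ n ih =>
    cases l with
    | nil => simp [PySem.Chars.splitOn.go, mySplit, glue]
    | cons c rest =>
      rw [PySem.Chars.splitOn.go]
      by_cases hc : c = ' '
      · subst hc
        have hp : ([' '] : List Char).isPrefixOf (' ' :: rest) = true := by
          simp [List.isPrefixOf]
        rw [if_pos hp]
        have hd : List.drop ([' '] : List Char).length (' ' :: rest) = rest := by simp
        rw [hd, ih rest [] (cur.reverse :: acc) (by simp at h ⊢; omega)]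
        simp [mySplit, glue]
        cases hms : mySplit rest with
        | nil => exact absurd hms (mySplit_ne_nil rest)
        | cons w ws => simp
      · have hp : ([' '] : List Char).isPrefixOf (c :: rest) = false := by
          simp [List.isPrefixOf]
          intro hcc; exact hc hcc.symm
        rw [if_neg (by simp [hp])]
        rw [ih rest (c :: cur) acc (by simp at h ⊢; omega)]
        simp only [mySplit, if_neg hc, List.reverse_cons]
        cases hms : mySplit rest with
        | nil => exact absurd hms (mySplit_ne_nil rest)
        | cons w ws => simp [glue]

theorem splitOn_eq_mySplit (s : List Char) :
    PySem.Chars.splitOn s [' '] = mySplit s := by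
  unfold PySem.Chars.splitOn
  rw [go_inv (s.length + 1) s [] [] (by omega)]
  cases hms : mySplit s with
  | nil => exact absurd hms (mySplit_ne_nil s)
  | cons w ws => simp [glue]

-- the per-(word-pair) step of A's loop, named for the proofs
def stepA (st : Int × Int) (wp : List Char × List Char) : Int × Int :=
  let our_val := word_value wp.1
  let their_val := word_value wp.2
  if our_val > their_val then (st.1 + 1, st.2)
  else if their_val > our_val then (st.1, st.2 + 1)
  else st

-- A's per-character step equals adding B's per-character score
theorem step_char_eq (v : Int) (ch : Char) :
    (if PySem.Chars.isupper ch then v + ((ch.toNat : Int) - 65 + 1) * 2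
     else v + ((ch.toNat : Int) - 97 + 1)) = v + bchar ch := by
  unfold bchar PySem.Chars.isupper
  simp only [Bool.and_eq_true, decide_eq_true_eq]
  split_ifs <;> ring

theorem word_value_cons (c : Char) (w : List Char) :
    word_value (c :: w) = bchar c + word_value w := by
  unfold word_value
  rw [show (fun (value : Int) ch =>
        if PySem.Chars.isupper ch then value + ((ch.toNat : Int) - 65 + 1) * 2
        else value + ((ch.toNat : Int) - 97 + 1))
      = (fun (value : Int) ch => value + bchar ch) from
    funext fun v => funext fun ch => step_char_eq v ch]
  rw [List.foldl_cons, PySem.List.foldl_add]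
  ring_nf
  rw [PySem.List.foldl_add]
  ring

-- readWordB reads the first mySplit word: its score plus the accumulator, and
-- the remaining characters (none iff the string had no more spaces)
theorem readWordB_spec : ∀ (s : List Char) (a : Int),
    (mySplit s = [s] ∧ readWordB s a = (a + word_value s, none))
    ∨ (∃ w r, mySplit s = w :: mySplit r ∧ readWordB s a = (a + word_value w, some r)) := by
  intro s
  induction s with
  | nil => intro a; left; simp [mySplit, readWordB, word_value]
  | cons c rest ih =>
    intro a
    by_cases hc : c = ' '
    · subst hc
      right
      exact ⟨[], rest, by simp [mySplit], by simp [readWordB, word_value]⟩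
    · rcases ih (a + bchar c) with ⟨h1, h2⟩ | ⟨w, r, h1, h2⟩
      · left
        constructor
        · simp [mySplit, hc, h1]
        · simp [readWordB, hc, h2, word_value_cons]; ring
      · right
        refine ⟨c :: w, r, ?_, ?_⟩
        · simp [mySplit, hc, h1]
        · simp [readWordB, hc, h2, word_value_cons]; ring

-- B's net counter computes the difference of A's two counters
theorem loopB_eq_fold : ∀ (n : Nat) (s t : List Char) (o th : Int), s.length ≤ n →
    loopB s t (o - th) =
      (((mySplit s).zip (mySplit t)).foldl stepA (o, th)).1
      - (((mySplit s).zip (mySplit t)).foldl stepA (o, th)).2 := by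
  intro n
  induction n with
  | zero =>
    intro s t o th hs
    have hnil : s = [] := by cases s <;> simp_all
    subst hnil
    rcases readWordB_spec t 0 with ⟨htm, htr⟩ | ⟨w2, r2, htm, htr⟩ <;>
    · rw [loopB]
      split
      · rename_i a' s' b' t' ha hb
        rw [show readWordB [] 0 = ((0 : Int), (none : Option (List Char))) from rfl] at ha
        simp at ha
      · rename_i a' r1' b' r2' hno ha hb
        rw [show readWordB [] 0 = ((0 : Int), (none : Option (List Char))) from rfl] at ha
        rw [htr] at hb
        rw [Prod.mk.injEq] at ha hb
        obtain ⟨ha1, -⟩ := ha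
        obtain ⟨hb1, -⟩ := hb
        rw [htm]
        simp only [mySplit, List.zip_cons_cons, List.zip_nil_left, List.foldl_cons,
          List.foldl_nil]
        rw [← ha1, ← hb1]
        simp only [stepA, word_value, List.foldl_nil]
        split_ifs <;> simp <;> omega
  | succ n ih =>
    intro s t o th hs
    rcases readWordB_spec s 0 with ⟨hsm, hsr⟩ | ⟨w1, r1, hsm, hsr⟩ <;>
      rcases readWordB_spec t 0 with ⟨htm, htr⟩ | ⟨w2, r2, htm, htr⟩ <;>
      rw [loopB] <;> split
    -- eight split cases: four where the first match arm fired, four catch-all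
    · rename_i a' s' b' t' ha hb; rw [hsr] at ha; simp at ha
    · rename_i a' r1' b' r2' hno ha hb
      rw [hsr] at ha; rw [htr] at hb
      rw [Prod.mk.injEq] at ha hb
      obtain ⟨ha1, -⟩ := ha; obtain ⟨hb1, -⟩ := hb
      rw [hsm, htm]
      cases hmt : mySplit t with
      | nil => exact absurd hmt (mySplit_ne_nil t)
      | cons w ws =>
        rw [hmt] at htm
        cases htm
        simp only [List.zip_cons_cons, List.zip_nil_left, List.foldl_cons, List.foldl_nil]
        rw [← ha1, ← hb1]
        simp only [stepA]
        split_ifs <;> simp <;> omega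
    · rename_i a' s' b' t' ha hb; rw [hsr] at ha; simp at ha
    · rename_i a' r1' b' r2' hno ha hb
      rw [hsr] at ha; rw [htr] at hb
      rw [Prod.mk.injEq] at ha hb
      obtain ⟨ha1, -⟩ := ha; obtain ⟨hb1, -⟩ := hb
      rw [hsm, htm]
      simp only [List.zip_cons_cons, List.zip_nil_left, List.foldl_cons, List.foldl_nil]
      rw [← ha1, ← hb1]
      simp only [stepA]
      split_ifs <;> simp <;> omega
    · rename_i a' s' b' t' ha hb; rw [htr] at hb; simp at hb
    · rename_i a' r1' b' r2' hno ha hb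
      rw [hsr] at ha; rw [htr] at hb
      rw [Prod.mk.injEq] at ha hb
      obtain ⟨ha1, -⟩ := ha; obtain ⟨hb1, -⟩ := hb
      rw [hsm, htm]
      cases hms : mySplit s with
      | nil => exact absurd hms (mySplit_ne_nil s)
      | cons w ws =>
        rw [hms] at hsm
        cases hsm
        simp only [List.zip_cons_cons, List.zip_nil_right, List.foldl_cons, List.foldl_nil]
        rw [← ha1, ← hb1]
        simp only [stepA]
        split_ifs <;> simp <;> omega
    · -- both strings continue: one step, then the inductive hypothesis
      rename_i a' s' b' t' ha hb
      rw [hsr] at ha; rw [htr] at hb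
      rw [Prod.mk.injEq, Option.some.injEq] at ha hb
      obtain ⟨ha1, ha2⟩ := ha; obtain ⟨hb1, hb2⟩ := hb
      subst ha2 hb2
      rw [hsm, htm]
      simp only [List.zip_cons_cons, List.foldl_cons]
      have hr1 : r1.length ≤ n := by
        have := readWordB_some_lt s 0 _ _ hsr
        omega
      rcases hstep : stepA (o, th) (w1, w2) with ⟨o', th'⟩
      have hnet : (if a' > b' then o - th + 1
          else if b' > a' then o - th - 1 else o - th) = o' - th' := by
        unfold stepA at hstep
        simp only at hstep
        rw [← ha1, ← hb1]
        split_ifs at hstep <;> split_ifs <;>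
          (obtain ⟨h1, h2⟩ := Prod.mk.injEq .. ▸ hstep; omega)
      rw [hnet, ih r1 r2 o' th' hr1, ← hstep]
    · rename_i a' r1' b' r2' hno ha hb
      rw [hsr] at ha; rw [htr] at hb
      rw [Prod.mk.injEq] at ha hb
      exact (hno r1 r2 ha.2.symm hb.2.symm).elim

-- ===== VERDICT (by name: the statement is the Claim_ definition above) =====
theorem battle_of_words_spec : Claim_equal_battle_of_words := by
  intro our_team their_team _
  unfold Spec_battle_of_words battle_of_words battle_of_words_alt
  rw [splitOn_eq_mySplit, splitOn_eq_mySplit]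
  have hA : (fun (st : Int × Int) (wp : List Char × List Char) =>
      let our_val := word_value wp.1
      let their_val := word_value wp.2
      if our_val > their_val then (st.1 + 1, st.2)
      else if their_val > our_val then (st.1, st.2 + 1)
      else st) = stepA := rfl
  rw [hA]
  have h := loopB_eq_fold our_team.toList.length our_team.toList their_team.toList 0 0 le_rfl
  norm_num at h
  dsimp only
  rw [h]
  split_ifs <;> first | rfl | omega
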